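-- pv_equiv track=rewrite | github.com/ksayee/programming_assignments | python/CodingExercises/LeetCode1370.py | LeetCode1370
-- ===== SOURCE A (Python) =====
-- import collections
--
-- def LeetCode1370(str1):
--
--     dict=collections.Counter(str1)
--     output_lst=[]
--     while len(dict)>0:
--         lst = list(dict.keys())
--         while len(lst)>0:
--             min_element=min(lst)
--             idx=lst.index(min_element)
--             lst.pop(idx)
--             output_lst.append(min_element)
--             if dict[min_element]==1:
--                 del dict[min_element]
--             else:
--                 dict[min_element]=dict[min_element]-1
--         lst = list(dict.keys())
--         while len(lst)>0:
--             max_element=max(lst)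
--             idx=lst.index(max_element)
--             lst.pop(idx)
--             output_lst.append(max_element)
--             if dict[max_element]==1:
--                 del dict[max_element]
--             else:
--                 dict[max_element]=dict[max_element]-1
--     return ''.join(output_lst)
-- ===== SOURCE B (Python) =====
-- import collections
--
-- def LeetCode1370(str1):
--     cnt = collections.Counter(str1)
--     keys = sorted(cnt)
--     out = []
--     remaining = len(str1)
--     while remaining > 0:
--         for k in keys:
--             if cnt[k] > 0:
--                 out.append(k)
--                 cnt[k] -= 1
--                 remaining -= 1
--         for k in reversed(keys):
--             if cnt[k] > 0:
--                 out.append(k)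
--                 cnt[k] -= 1
--                 remaining -= 1
--     return ''.join(out)
-- ===== Notes on version B (the rewrite author's own statement) =====
-- stated objective: faster
-- what changed: B sorts the distinct characters once and then makes alternating ascending/descending sweeps over that fixed key list decrementing counts, instead of A's per-character min/max selection with list.index and pop over a key list rebuilt from the dict each round.
import Mathlib
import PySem

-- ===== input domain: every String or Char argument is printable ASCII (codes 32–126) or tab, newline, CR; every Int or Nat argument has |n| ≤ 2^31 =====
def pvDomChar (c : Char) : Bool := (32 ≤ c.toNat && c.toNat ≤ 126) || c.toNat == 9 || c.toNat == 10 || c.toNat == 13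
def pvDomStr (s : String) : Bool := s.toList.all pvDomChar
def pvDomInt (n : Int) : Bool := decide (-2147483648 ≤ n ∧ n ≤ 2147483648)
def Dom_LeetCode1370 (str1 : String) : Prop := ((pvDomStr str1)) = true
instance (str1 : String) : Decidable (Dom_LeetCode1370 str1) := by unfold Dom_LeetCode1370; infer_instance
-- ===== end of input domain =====

-- B replaces A's per-character min/max selection (list.index + pop over a rebuilt key list)
-- by alternating sweeps over the once-sorted distinct characters, decrementing counts (objective: faster).

-- ===== PORT A =====
-- the common body of A's two inner-loop dict updates: del at count 1, else decrement
def pvDecA (d : PySem.Dict Char Int) (m : Char) : PySem.Dict Char Int :=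
  if d.getD m 0 = 1 then d.erase m else d.insert m (d.getD m 0 - 1)

-- A's first inner while: pop the min of lst each time (fuel = initial lst length)
def pvAscA : Nat → List Char → PySem.Dict Char Int → List Char → PySem.Dict Char Int × List Char
  | 0, _, d, out => (d, out)
  | fuel+1, lst, d, out =>
    if lst.length > 0 then
      match PySem.List.min? lst (fun c => c) with
      | none => (d, out)
      | some m =>
        match PySem.List.index? lst m with
        | none => (d, out)
        | some idx =>
          match PySem.List.pop? lst (idx : Int) with
          | none => (d, out)
          | some r => pvAscA fuel r.2 (pvDecA d m) (out ++ [m])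
    else (d, out)

-- A's second inner while: pop the max of lst each time
def pvDescA : Nat → List Char → PySem.Dict Char Int → List Char → PySem.Dict Char Int × List Char
  | 0, _, d, out => (d, out)
  | fuel+1, lst, d, out =>
    if lst.length > 0 then
      match PySem.List.max? lst (fun c => c) with
      | none => (d, out)
      | some m =>
        match PySem.List.index? lst m with
        | none => (d, out)
        | some idx =>
          match PySem.List.pop? lst (idx : Int) with
          | none => (d, out)
          | some r => pvDescA fuel r.2 (pvDecA d m) (out ++ [m])
    else (d, out)

-- A's outer while (fuel-bounded; n+1 rounds always suffice for a counter of an n-char string)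
def pvOuterA : Nat → PySem.Dict Char Int → List Char → List Char
  | 0, _, out => out
  | fuel+1, d, out =>
    if d.size > 0 then
      let lst := d.keys
      let r1 := pvAscA lst.length lst d out
      let lst2 := r1.1.keys
      let r2 := pvDescA lst2.length lst2 r1.1 r1.2
      pvOuterA fuel r2.1 r2.2
    else out

def LeetCode1370 (str1 : String) : String :=
  let cs := str1.toList
  let d := PySem.Dict.counter cs
  String.ofList (pvOuterA (cs.length + 1) d [])

-- ===== PORT B =====
-- B's sweep body: if cnt[k] > 0, emit k, decrement, count it off remaining
def pvStepB (acc : PySem.Dict Char Int × List Char × Int) (k : Char) :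
    PySem.Dict Char Int × List Char × Int :=
  if 0 < acc.1.getD k 0 then (acc.1.insert k (acc.1.getD k 0 - 1), acc.2.1 ++ [k], acc.2.2 - 1)
  else acc

-- B's outer while (fuel-bounded like A's): one ascending then one descending sweep per round
def pvOuterB : Nat → List Char → PySem.Dict Char Int × List Char × Int → List Char
  | 0, _, acc => acc.2.1
  | fuel+1, keys, acc =>
    if 0 < acc.2.2 then
      pvOuterB fuel keys (keys.reverse.foldl pvStepB (keys.foldl pvStepB acc))
    else acc.2.1

def LeetCode1370_alt (str1 : String) : String :=
  let cs := str1.toList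
  let cnt := PySem.Dict.counter cs
  let keys := PySem.List.sorted cnt.keys (fun c => c)
  String.ofList (pvOuterB (cs.length + 1) keys (cnt, [], (cs.length : Int)))

-- ===== PRECONDITION & SPEC =====
def Spec_LeetCode1370 (str1 : String) (out : String) : Prop := out = LeetCode1370_alt str1
instance (str1 : String) (out : String) : Decidable (Spec_LeetCode1370 str1 out) := by unfold Spec_LeetCode1370; infer_instance

-- ===== CLAIM (what is proved, stated in full; the proofs are below) =====
def Claim_equal_LeetCode1370 : Prop := ∀ (str1 : String), Dom_LeetCode1370 str1 → Spec_LeetCode1370 str1 (LeetCode1370 str1)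

-- ===== LEMMAS AND PROOFS =====

-- the abstract round structure both programs compute: counts as a function, live keys as a filter
def pvLive (keys : List Char) (c : Char → Int) : List Char :=
  keys.filter (fun k => decide (0 < c k))

def pvDec1 (c : Char → Int) : Char → Int := fun k => if 0 < c k then c k - 1 else c k

def pvSpec : Nat → List Char → (Char → Int) → List Char
  | 0, _, _ => []
  | fuel+1, keys, c =>
    if pvLive keys c = [] then []
    else pvLive keys c ++ (pvLive keys (pvDec1 c)).reverse ++ pvSpec fuel keys (pvDec1 (pvDec1 c))

def pvDecAll (l : List Char) (d : PySem.Dict Char Int) : PySem.Dict Char Int := l.foldl pvDecA d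

def pvBDec (l : List Char) (cnt : PySem.Dict Char Int) : PySem.Dict Char Int :=
  l.foldl (fun c k => if 0 < c.getD k 0 then c.insert k (c.getD k 0 - 1) else c) cnt

-- dict.erase facts (not provided by the prelude)
theorem pv_find?_filter_ne (l : List (Char × Int)) (k j : Char) (h : j ≠ k) :
    (l.filter (fun p => !(p.1 == k))).find? (fun p => p.1 == j) = l.find? (fun p => p.1 == j) := by
  induction l with
  | nil => rfl
  | cons p t ih =>
    by_cases hk : p.1 = k
    · have hkj : (k == j) = false := by simp [Ne.symm h]
      simp [hk, hkj, ih]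
    · simp only [List.filter_cons, show (!(p.1 == k)) = true by simp [hk], if_true,
        List.find?_cons]
      cases hpj : (p.1 == j) <;> simp [ih]

theorem pv_get?_erase (d : PySem.Dict Char Int) (k j : Char) :
    (d.erase k).get? j = if j = k then none else d.get? j := by
  by_cases h : j = k
  · subst h
    simp only [PySem.Dict.erase, PySem.Dict.get?, if_true]
    rw [List.find?_eq_none.mpr]
    · rfl
    · intro p hp
      have := (List.mem_filter.mp hp).2
      simp at this ⊢
      exact fun hjp => absurd hjp this
  · simp only [PySem.Dict.erase, PySem.Dict.get?, if_neg h]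
    rw [pv_find?_filter_ne _ _ _ h]

theorem pv_getD_erase (d : PySem.Dict Char Int) (k j : Char) :
    (d.erase k).getD j 0 = if j = k then 0 else d.getD j 0 := by
  simp only [PySem.Dict.getD, pv_get?_erase]
  split <;> rfl

theorem pv_keys_erase (d : PySem.Dict Char Int) (k : Char) :
    (d.erase k).keys = d.keys.filter (fun x => !(x == k)) := by
  simp only [PySem.Dict.keys, PySem.Dict.erase, List.filter_map]
  rfl

theorem pv_mem_keys_erase (d : PySem.Dict Char Int) (k j : Char) :
    j ∈ (d.erase k).keys ↔ j ≠ k ∧ j ∈ d.keys := by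
  simp [pv_keys_erase, List.mem_filter, and_comm]

theorem pv_nodup_keys_erase (d : PySem.Dict Char Int) (k : Char)
    (h : d.keys.Nodup) : (d.erase k).keys.Nodup := by
  rw [pv_keys_erase]; exact h.filter _

theorem pv_mem_keys_of_getD_pos (d : PySem.Dict Char Int) (j : Char)
    (h : 0 < d.getD j 0) : j ∈ d.keys := by
  by_contra hn
  rw [← PySem.Dict.get?_eq_none_iff_not_mem_keys] at hn
  simp [PySem.Dict.getD, hn] at h

-- sorted of a nodup list peels its min / max
theorem pv_sorted_min_cons (lst : List Char) (m : Char) (hnd : lst.Nodup)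
    (hm : PySem.List.min? lst (fun c => c) = some m) :
    PySem.List.sorted lst (fun c => c) = m :: PySem.List.sorted (lst.erase m) (fun c => c) := by
  have hmm : m ∈ lst := PySem.List.min?_mem hm
  apply PySem.List.sorted_eq_of_perm_of_pairwise_lt
  · exact (List.Perm.cons m (PySem.List.sorted_perm _ _ _)).trans (List.perm_cons_erase hmm).symm
  · rw [List.pairwise_cons]
    refine ⟨?_, ?_⟩
    · intro y hy
      have hy' : y ∈ lst.erase m := (PySem.List.mem_sorted _ _ _ _).mp hy
      have hyl : y ∈ lst := List.mem_of_mem_erase hy'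
      have hle : m ≤ y := PySem.List.min?_isMin hm y hyl
      have hne : y ≠ m := fun e => (List.Nodup.not_mem_erase hnd) (e ▸ hy')
      exact lt_of_le_of_ne hle (Ne.symm hne)
    · have h1 := PySem.List.sorted_pairwise (lst.erase m) (fun c : Char => c)
      have h2 : (PySem.List.sorted (lst.erase m) (fun c : Char => c)).Nodup :=
        (PySem.List.sorted_perm _ _ _).nodup_iff.mpr (hnd.erase m)
      exact (h1.and h2).imp (fun h => lt_of_le_of_ne h.1 h.2)

theorem pv_sorted_max_cons (lst : List Char) (m : Char) (hnd : lst.Nodup)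
    (hm : PySem.List.max? lst (fun c => c) = some m) :
    PySem.List.sorted lst (fun c => c) true = m :: PySem.List.sorted (lst.erase m) (fun c => c) true := by
  have hmm : m ∈ lst := PySem.List.max?_mem hm
  apply PySem.List.sorted_rev_eq_of_perm_of_pairwise_gt
  · exact (List.Perm.cons m (PySem.List.sorted_perm _ _ _)).trans (List.perm_cons_erase hmm).symm
  · rw [List.pairwise_cons]
    refine ⟨?_, ?_⟩
    · intro y hy
      have hy' : y ∈ lst.erase m := (PySem.List.mem_sorted _ _ _ _).mp hy
      have hyl : y ∈ lst := List.mem_of_mem_erase hy'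
      have hle : y ≤ m := PySem.List.max?_isMax hm y hyl
      have hne : y ≠ m := fun e => (List.Nodup.not_mem_erase hnd) (e ▸ hy')
      exact lt_of_le_of_ne hle hne
    · have h1 := PySem.List.sorted_pairwise_rev (xs := lst.erase m) (key := fun c : Char => c)
      have h2 : (PySem.List.sorted (lst.erase m) (fun c : Char => c) true).Nodup :=
        (PySem.List.sorted_perm _ _ _).nodup_iff.mpr (hnd.erase m)
      exact (h1.and h2).imp (fun h => lt_of_le_of_ne h.1 (Ne.symm h.2))

theorem pv_eraseIdx_len (pre suf : List Char) (m : Char) :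
    (pre ++ m :: suf).eraseIdx pre.length = pre ++ suf := by
  induction pre with
  | nil => simp
  | cons a t ih => simpa using ih

-- index-then-pop of an element is erase of its first occurrence
theorem pv_pop_index_erase (lst : List Char) (m : Char) (hm : m ∈ lst) :
    ∃ i : Nat, PySem.List.index? lst m = some i ∧
      PySem.List.pop? lst (i : Int) = some (m, lst.erase m) := by
  cases h : PySem.List.index? lst m with
  | none => exact absurd ((PySem.List.index?_eq_none_iff lst m).mp h) (by simpa using hm)
  | some i =>
    refine ⟨i, rfl, ?_⟩
    obtain ⟨pre, suf, hsplit, hlen, hnp⟩ := (PySem.List.index?_eq_some_iff lst m i).mp h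
    obtain ⟨hk, hval, _⟩ := PySem.List.getElem_of_index?_eq_some h
    rw [PySem.List.pop?_natCast lst i hk, hval]
    subst hsplit
    have he1 : (pre ++ m :: suf).eraseIdx i = pre ++ suf := by
      rw [← hlen]; exact pv_eraseIdx_len pre suf m
    have he2 : (pre ++ m :: suf).erase m = pre ++ suf := by
      rw [List.erase_append_right _ hnp]; simp
    rw [he1, he2]

-- A's inner loops emit the sorted key list and decrement each key once
theorem pv_ascA_eq (fuel : Nat) : ∀ (lst : List Char) (d : PySem.Dict Char Int) (out : List Char),
    lst.length ≤ fuel → lst.Nodup →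
    pvAscA fuel lst d out =
      (pvDecAll (PySem.List.sorted lst (fun c => c)) d,
       out ++ PySem.List.sorted lst (fun c => c)) := by
  induction fuel with
  | zero =>
    intro lst d out hlen hnd
    have h0 : lst = [] := List.length_eq_zero_iff.mp (Nat.le_zero.mp hlen)
    subst h0
    have hs : PySem.List.sorted ([] : List Char) (fun c => c) = [] := by
      exact (PySem.List.sorted_eq_nil_iff _ _ false).mpr rfl
    simp [pvAscA, pvDecAll, hs]
  | succ f ih =>
    intro lst d out hlen hnd
    cases lst with
    | nil =>
      have hs : PySem.List.sorted ([] : List Char) (fun c => c) = [] := by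
        exact (PySem.List.sorted_eq_nil_iff _ _ false).mpr rfl
      simp [pvAscA, pvDecAll, hs]
    | cons x xs =>
      cases hm : PySem.List.min? (x :: xs) (fun c => c) with
      | none => exact absurd ((PySem.List.min?_eq_none_iff _ _).mp hm) (by simp)
      | some m =>
        have hmem : m ∈ x :: xs := PySem.List.min?_mem hm
        obtain ⟨i, hi, hpop⟩ := pv_pop_index_erase (x :: xs) m hmem
        have hstep : pvAscA (f+1) (x :: xs) d out =
            pvAscA f ((x :: xs).erase m) (pvDecA d m) (out ++ [m]) := by
          simp only [pvAscA]
          rw [if_pos (by simp)]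
          simp only [hm, hi, hpop]
        have hlen' : ((x :: xs).erase m).length ≤ f := by
          rw [List.length_erase_of_mem hmem]
          simpa using Nat.le_of_succ_le_succ (by simpa using hlen)
        rw [hstep, ih _ _ _ hlen' (hnd.erase m), pv_sorted_min_cons _ m hnd hm]
        simp [pvDecAll]

theorem pv_descA_eq (fuel : Nat) : ∀ (lst : List Char) (d : PySem.Dict Char Int) (out : List Char),
    lst.length ≤ fuel → lst.Nodup →
    pvDescA fuel lst d out =
      (pvDecAll (PySem.List.sorted lst (fun c => c) true) d,
       out ++ PySem.List.sorted lst (fun c => c) true) := by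
  induction fuel with
  | zero =>
    intro lst d out hlen hnd
    have h0 : lst = [] := List.length_eq_zero_iff.mp (Nat.le_zero.mp hlen)
    subst h0
    have hs : PySem.List.sorted ([] : List Char) (fun c => c) true = [] := by
      exact (PySem.List.sorted_eq_nil_iff _ _ true).mpr rfl
    simp [pvDescA, pvDecAll, hs]
  | succ f ih =>
    intro lst d out hlen hnd
    cases lst with
    | nil =>
      have hs : PySem.List.sorted ([] : List Char) (fun c => c) true = [] := by
        exact (PySem.List.sorted_eq_nil_iff _ _ true).mpr rfl
      simp [pvDescA, pvDecAll, hs]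
    | cons x xs =>
      cases hm : PySem.List.max? (x :: xs) (fun c => c) with
      | none => exact absurd ((PySem.List.max?_eq_none_iff _ _).mp hm) (by simp)
      | some m =>
        have hmem : m ∈ x :: xs := PySem.List.max?_mem hm
        obtain ⟨i, hi, hpop⟩ := pv_pop_index_erase (x :: xs) m hmem
        have hstep : pvDescA (f+1) (x :: xs) d out =
            pvDescA f ((x :: xs).erase m) (pvDecA d m) (out ++ [m]) := by
          simp only [pvDescA]
          rw [if_pos (by simp)]
          simp only [hm, hi, hpop]
        have hlen' : ((x :: xs).erase m).length ≤ f := by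
          rw [List.length_erase_of_mem hmem]
          simpa using Nat.le_of_succ_le_succ (by simpa using hlen)
        rw [hstep, ih _ _ _ hlen' (hnd.erase m), pv_sorted_max_cons _ m hnd hm]
        simp [pvDecAll]

-- effect of one decrement step / pass on the dict
theorem pv_decA_getD (d : PySem.Dict Char Int) (k : Char) (_hk : 0 < d.getD k 0) (x : Char) :
    (pvDecA d k).getD x 0 = if x = k then d.getD k 0 - 1 else d.getD x 0 := by
  unfold pvDecA
  by_cases h1 : d.getD k 0 = 1
  · rw [if_pos h1, pv_getD_erase]
    split
    · omega
    · rfl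
  · rw [if_neg h1, PySem.Dict.getD_insert]

theorem pv_decA_mem_keys (d : PySem.Dict Char Int) (k : Char) (hk : 0 < d.getD k 0) (x : Char) :
    x ∈ (pvDecA d k).keys ↔ (x ∈ d.keys ∧ ¬(x = k ∧ d.getD k 0 = 1)) := by
  have hkk : k ∈ d.keys := pv_mem_keys_of_getD_pos d k hk
  unfold pvDecA
  by_cases h1 : d.getD k 0 = 1
  · rw [if_pos h1, pv_mem_keys_erase]
    constructor
    · rintro ⟨hne, hx⟩; exact ⟨hx, fun h => hne h.1⟩
    · rintro ⟨hx, hn⟩; exact ⟨fun e => hn ⟨e, h1⟩, hx⟩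
  · rw [if_neg h1, PySem.Dict.mem_keys_insert]
    constructor
    · rintro (e | hx)
      · exact ⟨e ▸ hkk, fun h => h1 h.2⟩
      · exact ⟨hx, fun h => h1 h.2⟩
    · rintro ⟨hx, _⟩; exact Or.inr hx

theorem pv_decA_nodup (d : PySem.Dict Char Int) (k : Char) (h : d.keys.Nodup) :
    (pvDecA d k).keys.Nodup := by
  unfold pvDecA
  split
  · exact pv_nodup_keys_erase d k h
  · exact PySem.Dict.nodup_keys_insert d k _ h

theorem pv_decAll_getD (l : List Char) : ∀ (d : PySem.Dict Char Int), l.Nodup →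
    (∀ k ∈ l, 0 < d.getD k 0) → ∀ j,
    (pvDecAll l d).getD j 0 = if j ∈ l then d.getD j 0 - 1 else d.getD j 0 := by
  induction l with
  | nil => intro d _ _ j; simp [pvDecAll]
  | cons k rest ih =>
    intro d hnd hpos j
    have hk : 0 < d.getD k 0 := hpos k (List.mem_cons_self)
    have hknr : k ∉ rest := (List.nodup_cons.mp hnd).1
    have hrec : pvDecAll (k :: rest) d = pvDecAll rest (pvDecA d k) := rfl
    rw [hrec, ih (pvDecA d k) (List.nodup_cons.mp hnd).2
      (fun x hx => by
        rw [pv_decA_getD d k hk x, if_neg (fun e : x = k => hknr (e ▸ hx))]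
        exact hpos x (List.mem_cons_of_mem _ hx)) j]
    rw [pv_decA_getD d k hk j]
    by_cases hjk : j = k
    · subst hjk
      simp [hknr]
    · simp [hjk, List.mem_cons]

theorem pv_decAll_mem_keys (l : List Char) : ∀ (d : PySem.Dict Char Int), l.Nodup →
    (∀ k ∈ l, 0 < d.getD k 0) → ∀ j,
    (j ∈ (pvDecAll l d).keys ↔ (j ∈ d.keys ∧ ¬(j ∈ l ∧ d.getD j 0 = 1))) := by
  induction l with
  | nil => intro d _ _ j; simp [pvDecAll]
  | cons k rest ih =>
    intro d hnd hpos j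
    have hk : 0 < d.getD k 0 := hpos k (List.mem_cons_self)
    have hknr : k ∉ rest := (List.nodup_cons.mp hnd).1
    have hrec : pvDecAll (k :: rest) d = pvDecAll rest (pvDecA d k) := rfl
    rw [hrec, ih (pvDecA d k) (List.nodup_cons.mp hnd).2
      (fun x hx => by
        rw [pv_decA_getD d k hk x, if_neg (fun e : x = k => hknr (e ▸ hx))]
        exact hpos x (List.mem_cons_of_mem _ hx)) j]
    rw [pv_decA_mem_keys d k hk j, pv_decA_getD d k hk j]
    by_cases hjk : j = k
    · subst hjk
      simp [hknr]
    · rw [if_neg hjk]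
      simp only [List.mem_cons]
      constructor
      · rintro ⟨⟨h1, h2⟩, h3⟩
        refine ⟨h1, ?_⟩
        rintro ⟨(e | hr), hv⟩
        · exact hjk e
        · exact h3 ⟨hr, hv⟩
      · rintro ⟨h1, h2⟩
        exact ⟨⟨h1, fun h => hjk h.1⟩, fun h => h2 ⟨Or.inr h.1, h.2⟩⟩

theorem pv_decAll_nodup (l : List Char) : ∀ (d : PySem.Dict Char Int),
    d.keys.Nodup → (pvDecAll l d).keys.Nodup := by
  induction l with
  | nil => intro d h; exact h
  | cons k rest ih =>
    intro d h
    exact ih (pvDecA d k) (pv_decA_nodup d k h)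

-- B's sweep characterised
theorem pv_bpass_eq (l : List Char) : ∀ (cnt : PySem.Dict Char Int) (out : List Char) (rem : Int),
    l.Nodup →
    l.foldl pvStepB (cnt, out, rem) =
      (pvBDec l cnt, out ++ l.filter (fun k => decide (0 < cnt.getD k 0)),
       rem - ((l.filter (fun k => decide (0 < cnt.getD k 0))).length : Int)) := by
  induction l with
  | nil => intro cnt out rem _; simp [pvBDec]
  | cons k rest ih =>
    intro cnt out rem hnd
    have hknr : k ∉ rest := (List.nodup_cons.mp hnd).1
    by_cases h : 0 < cnt.getD k 0
    · have hstep : (k :: rest).foldl pvStepB (cnt, out, rem) =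
          rest.foldl pvStepB (cnt.insert k (cnt.getD k 0 - 1), out ++ [k], rem - 1) := by
        simp [pvStepB, h]
      rw [hstep, ih _ _ _ (List.nodup_cons.mp hnd).2]
      have hfc : rest.filter (fun x => decide (0 < (cnt.insert k (cnt.getD k 0 - 1)).getD x 0)) =
          rest.filter (fun x => decide (0 < cnt.getD x 0)) := by
        apply List.filter_congr
        intro x hx
        rw [PySem.Dict.getD_insert, if_neg (fun e : x = k => hknr (e ▸ hx))]
      rw [hfc]
      have hfk : (k :: rest).filter (fun x => decide (0 < cnt.getD x 0)) =
          k :: rest.filter (fun x => decide (0 < cnt.getD x 0)) := by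
        simp [h]
      rw [hfk]
      have hB : pvBDec (k :: rest) cnt = pvBDec rest (cnt.insert k (cnt.getD k 0 - 1)) := by
        simp [pvBDec, h]
      rw [hB]
      simp only [Prod.mk.injEq, List.length_cons, true_and]
      refine ⟨by simp, by push_cast; ring⟩
    · have hstep : (k :: rest).foldl pvStepB (cnt, out, rem) =
          rest.foldl pvStepB (cnt, out, rem) := by
        simp [pvStepB, h]
      rw [hstep, ih _ _ _ (List.nodup_cons.mp hnd).2]
      have hB : pvBDec (k :: rest) cnt = pvBDec rest cnt := by
        simp [pvBDec, h]
      simp [hB, h]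

theorem pv_bdec_getD (l : List Char) : ∀ (cnt : PySem.Dict Char Int), l.Nodup → ∀ j,
    (pvBDec l cnt).getD j 0 =
      if j ∈ l ∧ 0 < cnt.getD j 0 then cnt.getD j 0 - 1 else cnt.getD j 0 := by
  induction l with
  | nil => intro cnt _ j; simp [pvBDec]
  | cons k rest ih =>
    intro cnt hnd j
    have hknr : k ∉ rest := (List.nodup_cons.mp hnd).1
    by_cases h : 0 < cnt.getD k 0
    · have hrec : pvBDec (k :: rest) cnt = pvBDec rest (cnt.insert k (cnt.getD k 0 - 1)) := by
        simp [pvBDec, h]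
      rw [hrec, ih _ (List.nodup_cons.mp hnd).2 j]
      by_cases hjk : j = k
      · subst hjk
        simp [hknr, h, List.mem_cons]
      · rw [PySem.Dict.getD_insert]
        simp [List.mem_cons, hjk]
    · have hrec : pvBDec (k :: rest) cnt = pvBDec rest cnt := by
        simp [pvBDec, h]
      rw [hrec, ih _ (List.nodup_cons.mp hnd).2 j]
      by_cases hjk : j = k
      · subst hjk
        simp [hknr, h]
      · simp [List.mem_cons, hjk]

-- the live keys of a dict, sorted, are the filter of the fixed sorted key list
theorem pv_sorted_keys_live (KS : List Char) (hKSp : KS.Pairwise (· < ·))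
    (d : PySem.Dict Char Int) (c : Char → Int)
    (hnd : d.keys.Nodup) (hmem : ∀ j, j ∈ d.keys ↔ 0 < c j) (hKS : ∀ j, 0 < c j → j ∈ KS) :
    PySem.List.sorted d.keys (fun x => x) = pvLive KS c := by
  have hKSnd : KS.Nodup := hKSp.imp ne_of_lt
  have hlnd : (pvLive KS c).Nodup := hKSnd.filter _
  apply PySem.List.sorted_eq_of_perm_of_pairwise_lt
  · rw [List.perm_ext_iff_of_nodup hlnd hnd]
    intro a
    simp only [pvLive, List.mem_filter, decide_eq_true_eq, hmem]
    exact ⟨fun h => h.2, fun h => ⟨hKS a h, h⟩⟩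
  · exact hKSp.filter _

theorem pv_sorted_keys_live_rev (KS : List Char) (hKSp : KS.Pairwise (· < ·))
    (d : PySem.Dict Char Int) (c : Char → Int)
    (hnd : d.keys.Nodup) (hmem : ∀ j, j ∈ d.keys ↔ 0 < c j) (hKS : ∀ j, 0 < c j → j ∈ KS) :
    PySem.List.sorted d.keys (fun x => x) true = (pvLive KS c).reverse := by
  have hKSnd : KS.Nodup := hKSp.imp ne_of_lt
  have hlnd : ((pvLive KS c).reverse).Nodup := List.nodup_reverse.mpr (hKSnd.filter _)
  apply PySem.List.sorted_rev_eq_of_perm_of_pairwise_gt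
  · rw [List.perm_ext_iff_of_nodup hlnd hnd]
    intro a
    simp only [List.mem_reverse, pvLive, List.mem_filter, decide_eq_true_eq, hmem]
    exact ⟨fun h => h.2, fun h => ⟨hKS a h, h⟩⟩
  · exact List.pairwise_reverse.mpr (hKSp.filter _)

-- sums
theorem pv_sum_pos_iff (l : List Char) (c : Char → Int) (h : ∀ j ∈ l, 0 ≤ c j) :
    (0 < (l.map c).sum ↔ ∃ j ∈ l, 0 < c j) := by
  induction l with
  | nil => simp
  | cons k rest ih =>
    have hr : ∀ j ∈ rest, 0 ≤ c j := fun j hj => h j (List.mem_cons_of_mem _ hj)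
    have hk : 0 ≤ c k := h k (List.mem_cons_self)
    have hS : 0 ≤ (rest.map c).sum := by
      apply List.sum_nonneg
      intro x hx
      obtain ⟨j, hj, rfl⟩ := List.mem_map.mp hx
      exact hr j hj
    simp only [List.map_cons, List.sum_cons, List.mem_cons]
    constructor
    · intro hpos
      by_cases hck : 0 < c k
      · exact ⟨k, Or.inl rfl, hck⟩
      · have : 0 < (rest.map c).sum := by omega
        obtain ⟨j, hj, hcj⟩ := (ih hr).mp this
        exact ⟨j, Or.inr hj, hcj⟩
    · rintro ⟨j, (rfl | hj), hcj⟩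
      · omega
      · have := (ih hr).mpr ⟨j, hj, hcj⟩
        omega

theorem pv_sum_dec1 (l : List Char) (c : Char → Int) :
    (l.map (pvDec1 c)).sum = (l.map c).sum - ((l.filter (fun k => decide (0 < c k))).length : Int) := by
  induction l with
  | nil => simp
  | cons k rest ih =>
    simp only [List.map_cons, List.sum_cons, List.filter_cons]
    by_cases h : 0 < c k
    · simp only [pvDec1, decide_eq_true_eq, h, ih]
      simp only [if_pos trivial, List.length_cons]
      push_cast
      ring
    · simp only [pvDec1, if_neg h, ih]
      have hd : (decide (0 < c k)) = false := by simpa using h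
      rw [hd]
      simp
      ring

-- one decrement pass, abstracted over the pass order l
theorem pv_decAll_round (l : List Char) (d : PySem.Dict Char Int) (c : Char → Int)
    (hc : ∀ j, d.getD j 0 = c j) (hnd : d.keys.Nodup)
    (hmem : ∀ j, j ∈ d.keys ↔ 0 < c j)
    (hlnd : l.Nodup) (hlmem : ∀ j, j ∈ l ↔ 0 < c j) :
    (∀ j, (pvDecAll l d).getD j 0 = pvDec1 c j) ∧ (pvDecAll l d).keys.Nodup ∧
    (∀ j, j ∈ (pvDecAll l d).keys ↔ 0 < pvDec1 c j) := by
  have hlpos : ∀ k ∈ l, 0 < d.getD k 0 := by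
    intro k hk
    rw [hc k]
    exact (hlmem k).mp hk
  refine ⟨?_, pv_decAll_nodup l d hnd, ?_⟩
  · intro j
    rw [pv_decAll_getD l d hlnd hlpos j]
    unfold pvDec1
    by_cases hj : 0 < c j
    · rw [if_pos ((hlmem j).mpr hj), if_pos hj, hc j]
    · rw [if_neg (fun h => hj ((hlmem j).mp h)), if_neg hj, hc j]
  · intro j
    rw [pv_decAll_mem_keys l d hlnd hlpos j, hmem j, hc j]
    unfold pvDec1
    by_cases hj : 0 < c j
    · rw [if_pos hj]
      constructor
      · rintro ⟨_, hn⟩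
        have h1 : c j ≠ 1 := fun e => hn ⟨(hlmem j).mpr hj, e⟩
        omega
      · intro hgt
        exact ⟨hj, fun h => absurd h.2 (by omega)⟩
    · rw [if_neg hj]
      constructor
      · rintro ⟨hcj, _⟩; exact absurd hcj hj
      · intro hgt; exact absurd hgt hj

-- main inductions
theorem pv_mainA (KS : List Char) (hKSp : KS.Pairwise (· < ·)) (fuel : Nat) :
    ∀ (d : PySem.Dict Char Int) (out : List Char) (c : Char → Int),
    (∀ j, d.getD j 0 = c j) → d.keys.Nodup → (∀ j, j ∈ d.keys ↔ 0 < c j) →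
    (∀ j, 0 < c j → j ∈ KS) →
    pvOuterA fuel d out = out ++ pvSpec fuel KS c := by
  have hLgen : ∀ (c' : Char → Int), (∀ j, 0 < c' j → j ∈ KS) →
      ∀ j, (j ∈ pvLive KS c' ↔ 0 < c' j) := by
    intro c' hks j
    simp only [pvLive, List.mem_filter, decide_eq_true_eq]
    exact ⟨fun h => h.2, fun h => ⟨hks j h, h⟩⟩
  induction fuel with
  | zero => intro d out c hc hnd hmem hKS; simp [pvOuterA, pvSpec]
  | succ f ih =>
    intro d out c hc hnd hmem hKS
    have hL := hLgen c hKS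
    by_cases hsz : d.size > 0
    · have hlive_ne : pvLive KS c ≠ [] := by
        intro hnil
        have hkne : d.keys ≠ [] := by
          intro h0
          have h1 : d.size = 0 := by
            simpa [PySem.Dict.size, PySem.Dict.keys] using congrArg List.length h0
          omega
        obtain ⟨j, hj⟩ := List.exists_mem_of_ne_nil _ hkne
        have hcj := (hmem j).mp hj
        have hjL : j ∈ pvLive KS c := (hL j).mpr hcj
        rw [hnil] at hjL
        exact absurd hjL (List.not_mem_nil)
      have hdec_pos : ∀ (c' : Char → Int) (j : Char), 0 < pvDec1 c' j → 0 < c' j := by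
        intro c' j hj
        unfold pvDec1 at hj
        split at hj <;> omega
      have hKS1 : ∀ j, 0 < pvDec1 c j → j ∈ KS :=
        fun j hj => hKS j (hdec_pos c j hj)
      have hKS2 : ∀ j, 0 < pvDec1 (pvDec1 c) j → j ∈ KS :=
        fun j hj => hKS1 j (hdec_pos _ j hj)
      have hL1 := hLgen (pvDec1 c) hKS1
      have hasc := pv_ascA_eq d.keys.length d.keys d out (le_refl _) hnd
      have hsortedA : PySem.List.sorted d.keys (fun c => c) = pvLive KS c :=
        pv_sorted_keys_live KS hKSp d c hnd hmem hKS
      have hLnd : (pvLive KS c).Nodup := (hKSp.imp ne_of_lt).filter _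
      obtain ⟨hd1getD, hd1nd, hd1mem⟩ :=
        pv_decAll_round (pvLive KS c) d c hc hnd hmem hLnd hL
      have hsortedD : PySem.List.sorted (pvDecAll (pvLive KS c) d).keys (fun c => c) true =
          (pvLive KS (pvDec1 c)).reverse :=
        pv_sorted_keys_live_rev KS hKSp _ (pvDec1 c) hd1nd hd1mem hKS1
      have hdesc := pv_descA_eq (pvDecAll (pvLive KS c) d).keys.length
        (pvDecAll (pvLive KS c) d).keys (pvDecAll (pvLive KS c) d)
        (out ++ pvLive KS c) (le_refl _) hd1nd
      have hL1nd : (pvLive KS (pvDec1 c)).reverse.Nodup :=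
        List.nodup_reverse.mpr ((hKSp.imp ne_of_lt).filter _)
      have hL1mem : ∀ j, j ∈ (pvLive KS (pvDec1 c)).reverse ↔ 0 < pvDec1 c j := by
        intro j
        rw [List.mem_reverse]
        exact hL1 j
      obtain ⟨hd2getD, hd2nd, hd2mem⟩ :=
        pv_decAll_round (pvLive KS (pvDec1 c)).reverse (pvDecAll (pvLive KS c) d) (pvDec1 c)
          hd1getD hd1nd hd1mem hL1nd hL1mem
      have hstep : pvOuterA (f+1) d out =
          pvOuterA f (pvDecAll (pvLive KS (pvDec1 c)).reverse (pvDecAll (pvLive KS c) d))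
            (out ++ pvLive KS c ++ (pvLive KS (pvDec1 c)).reverse) := by
        simp only [pvOuterA, if_pos hsz]
        rw [hasc]
        simp only []
        rw [hsortedA, hdesc, hsortedD]
      rw [hstep, ih _ _ _ hd2getD hd2nd hd2mem hKS2]
      have hspec : pvSpec (f+1) KS c =
          pvLive KS c ++ (pvLive KS (pvDec1 c)).reverse ++ pvSpec f KS (pvDec1 (pvDec1 c)) := by
        simp only [pvSpec]
        rw [if_neg hlive_ne]
      rw [hspec]
      simp [List.append_assoc]
    · have hkeysnil : d.keys = [] := by
        have h1 : d.items.length = 0 := by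
          simp only [PySem.Dict.size] at hsz
          omega
        simp [PySem.Dict.keys, List.length_eq_zero_iff.mp h1]
      have hlive : pvLive KS c = [] := by
        rw [List.eq_nil_iff_forall_not_mem]
        intro j hj
        have hcj := (hL j).mp hj
        have hjk : j ∈ d.keys := (hmem j).mpr hcj
        rw [hkeysnil] at hjk
        exact absurd hjk (List.not_mem_nil)
      simp [pvOuterA, hsz, pvSpec, hlive]

theorem pv_mainB (KS : List Char) (hKSnd : KS.Nodup) (fuel : Nat) :
    ∀ (cnt : PySem.Dict Char Int) (out : List Char) (rem : Int) (c : Char → Int),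
    (∀ j, cnt.getD j 0 = c j) → (∀ j, 0 ≤ c j) → (∀ j, 0 < c j → j ∈ KS) →
    rem = (KS.map c).sum →
    pvOuterB fuel KS (cnt, out, rem) = out ++ pvSpec fuel KS c := by
  have hdec_pos : ∀ (c' : Char → Int) (j : Char), 0 < pvDec1 c' j → 0 < c' j := by
    intro c' j hj
    unfold pvDec1 at hj
    split at hj <;> omega
  have hdec_nonneg : ∀ (c' : Char → Int), (∀ j, 0 ≤ c' j) → ∀ j, 0 ≤ pvDec1 c' j := by
    intro c' h j
    unfold pvDec1
    have := h j
    split <;> omega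
  have hbround : ∀ (l : List Char) (cnt' : PySem.Dict Char Int) (c' : Char → Int),
      (∀ j, cnt'.getD j 0 = c' j) → l.Nodup → (∀ j, 0 < c' j → j ∈ l) →
      ∀ j, (pvBDec l cnt').getD j 0 = pvDec1 c' j := by
    intro l cnt' c' hc' hlnd hcond j
    rw [pv_bdec_getD l cnt' hlnd j]
    unfold pvDec1
    by_cases hj : 0 < c' j
    · rw [if_pos ⟨hcond j hj, by rw [hc' j]; exact hj⟩, if_pos hj, hc' j]
    · rw [if_neg (fun h => hj (by rw [← hc' j]; exact h.2)), if_neg hj, hc' j]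
  induction fuel with
  | zero => intro cnt out rem c _ _ _ _; simp [pvOuterB, pvSpec]
  | succ f ih =>
    intro cnt out rem c hc hge hKS hrem
    have hfun : (fun k => decide (0 < cnt.getD k 0)) = (fun k => decide (0 < c k)) := by
      funext k; rw [hc k]
    have hLdef : KS.filter (fun k => decide (0 < c k)) = pvLive KS c := rfl
    by_cases hr : 0 < rem
    · have hlive_ne : pvLive KS c ≠ [] := by
        intro hnil
        obtain ⟨j, hj, hcj⟩ := (pv_sum_pos_iff KS c (fun j _ => hge j)).mp (hrem ▸ hr)
        have hjl : j ∈ pvLive KS c := by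
          simp [pvLive, List.mem_filter, hj, hcj]
        rw [hnil] at hjl
        exact absurd hjl (List.not_mem_nil)
      have hstep1 := pv_bpass_eq KS cnt out rem hKSnd
      rw [hfun, hLdef] at hstep1
      have hc1 : ∀ j, (pvBDec KS cnt).getD j 0 = pvDec1 c j :=
        hbround KS cnt c hc hKSnd hKS
      have hrevnd : KS.reverse.Nodup := List.nodup_reverse.mpr hKSnd
      have hstep2 := pv_bpass_eq KS.reverse (pvBDec KS cnt) (out ++ pvLive KS c)
        (rem - ((pvLive KS c).length : Int)) hrevnd
      have hfun1 : (fun k => decide (0 < (pvBDec KS cnt).getD k 0)) =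
          (fun k => decide (0 < pvDec1 c k)) := by
        funext k; rw [hc1 k]
      rw [hfun1] at hstep2
      have hfr : KS.reverse.filter (fun k => decide (0 < pvDec1 c k)) =
          (pvLive KS (pvDec1 c)).reverse := by
        unfold pvLive
        exact List.filter_reverse ..
      rw [hfr] at hstep2
      have hKS1 : ∀ j, 0 < pvDec1 c j → j ∈ KS.reverse :=
        fun j hj => List.mem_reverse.mpr (hKS j (hdec_pos c j hj))
      have hc2 : ∀ j, (pvBDec KS.reverse (pvBDec KS cnt)).getD j 0 = pvDec1 (pvDec1 c) j :=
        hbround KS.reverse (pvBDec KS cnt) (pvDec1 c) hc1 hrevnd hKS1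
      have hge1 : ∀ j, 0 ≤ pvDec1 c j := hdec_nonneg c hge
      have hge2 : ∀ j, 0 ≤ pvDec1 (pvDec1 c) j := hdec_nonneg (pvDec1 c) hge1
      have hKS2 : ∀ j, 0 < pvDec1 (pvDec1 c) j → j ∈ KS :=
        fun j hj => hKS j (hdec_pos c j (hdec_pos (pvDec1 c) j hj))
      have hrem2 : rem - ((pvLive KS c).length : Int) - (((pvLive KS (pvDec1 c)).reverse).length : Int) =
          (KS.map (pvDec1 (pvDec1 c))).sum := by
        rw [pv_sum_dec1 KS (pvDec1 c), pv_sum_dec1 KS c, List.length_reverse, hrem]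
        rfl
      have hstep : pvOuterB (f+1) KS (cnt, out, rem) =
          pvOuterB f KS (pvBDec KS.reverse (pvBDec KS cnt),
            out ++ pvLive KS c ++ (pvLive KS (pvDec1 c)).reverse,
            rem - ((pvLive KS c).length : Int) - (((pvLive KS (pvDec1 c)).reverse).length : Int)) := by
        simp only [pvOuterB, if_pos hr]
        rw [hstep1, hstep2]
      rw [hstep, ih _ _ _ _ hc2 hge2 hKS2 hrem2]
      have hspec : pvSpec (f+1) KS c =
          pvLive KS c ++ (pvLive KS (pvDec1 c)).reverse ++ pvSpec f KS (pvDec1 (pvDec1 c)) := by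
        simp only [pvSpec, if_neg hlive_ne]
      rw [hspec]
      simp [List.append_assoc]
    · have hlive : pvLive KS c = [] := by
        rw [List.eq_nil_iff_forall_not_mem]
        intro j hj
        have hjm : j ∈ KS ∧ 0 < c j := by
          simpa [pvLive, List.mem_filter] using hj
        have : 0 < (KS.map c).sum := (pv_sum_pos_iff KS c (fun j _ => hge j)).mpr ⟨j, hjm.1, hjm.2⟩
        rw [← hrem] at this
        exact hr this
      simp [pvOuterB, hr, pvSpec, hlive]

-- ===== VERDICT (by name: the statement is the Claim_ definition above) =====
theorem pv_cast_sum (l : List Char) (f : Char → Nat) :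
    (l.map (fun j => ((f j : Nat) : Int))).sum = ((l.map f).sum : Int) := by
  induction l with
  | nil => simp
  | cons k rest ih =>
    simp only [List.map_cons, List.sum_cons, ih]
    push_cast
    ring

theorem LeetCode1370_spec : Claim_equal_LeetCode1370 := by
  unfold Claim_equal_LeetCode1370
  intro str1 _
  unfold Spec_LeetCode1370 LeetCode1370 LeetCode1370_alt
  have hkeys := PySem.Dict.keys_counter (str1.toList)
  have hKSp : (PySem.List.sorted (PySem.Set.ofList str1.toList) (fun c => c)).Pairwise (· < ·) :=
    PySem.List.sorted_ofList_pairwise_lt str1.toList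
  have hKSnd : (PySem.List.sorted (PySem.Set.ofList str1.toList) (fun c => c)).Nodup :=
    hKSp.imp ne_of_lt
  have hc0 : ∀ j, (PySem.Dict.counter str1.toList).getD j 0 = ((str1.toList.count j : Nat) : Int) := by
    intro j
    exact PySem.Dict.getD_counter str1.toList j
  have hmem : ∀ j, j ∈ (PySem.Dict.counter str1.toList).keys ↔
      0 < ((str1.toList.count j : Nat) : Int) := by
    intro j
    rw [hkeys, PySem.Set.mem_ofList]
    rw [Int.natCast_pos, List.count_pos_iff]
  have hks : ∀ j, 0 < ((str1.toList.count j : Nat) : Int) →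
      j ∈ PySem.List.sorted (PySem.Set.ofList str1.toList) (fun c => c) := by
    intro j hj
    rw [PySem.List.mem_sorted, PySem.Set.mem_ofList]
    rw [Int.natCast_pos, List.count_pos_iff] at hj
    exact hj
  have hperm : (PySem.List.sorted (PySem.Set.ofList str1.toList) (fun c => c)).Perm
      str1.toList.dedup := by
    refine (PySem.List.sorted_perm _ _ _).trans ?_
    rw [List.perm_ext_iff_of_nodup (PySem.Set.nodup_ofList _) (List.nodup_dedup _)]
    intro a
    rw [PySem.Set.mem_ofList, List.mem_dedup]
  have hsum : ((str1.toList.length : Nat) : Int) =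
      ((PySem.List.sorted (PySem.Set.ofList str1.toList) (fun c => c)).map
        (fun j => ((str1.toList.count j : Nat) : Int))).sum := by
    rw [(hperm.map _).sum_eq, pv_cast_sum]
    congr 1
    exact (List.sum_map_count_dedup_eq_length str1.toList).symm
  have hA := pv_mainA (PySem.List.sorted (PySem.Set.ofList str1.toList) (fun c => c)) hKSp
    (str1.toList.length + 1) (PySem.Dict.counter str1.toList) []
    (fun j => ((str1.toList.count j : Nat) : Int)) hc0
    (PySem.Dict.nodup_keys_counter str1.toList) hmem hks
  have hB := pv_mainB (PySem.List.sorted (PySem.Set.ofList str1.toList) (fun c => c)) hKSnd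
    (str1.toList.length + 1) (PySem.Dict.counter str1.toList) [] (str1.toList.length : Int)
    (fun j => ((str1.toList.count j : Nat) : Int)) hc0
    (fun j => Int.natCast_nonneg _) hks hsum
  show String.ofList (pvOuterA (str1.toList.length + 1) (PySem.Dict.counter str1.toList) []) =
    String.ofList (pvOuterB (str1.toList.length + 1)
      (PySem.List.sorted (PySem.Dict.counter str1.toList).keys (fun c => c))
      (PySem.Dict.counter str1.toList, [], (str1.toList.length : Int)))
  rw [hkeys, hA, hB]
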